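-- pv_equiv track=rewrite | github.com/miliar/Code_Jam_Webscraper | Solutions_python/Problem_200/4299.py | checkbig
-- ===== SOURCE A (Python) =====
-- def checkbig(s):
--     for i in range(len(s)):
--         for j in range(i,len(s)):
--             if(s[i]>s[j]):
--                 for k in range(i,j):
--                     if(s[k]>s[i]):
--                         return k
--                 return i
--     return -1;
-- ===== SOURCE B (Python) =====
-- def checkbig(s):
--     n = len(s)
--     # suffix minimum: suf[i] = min(s[i:])
--     suf = [''] * n
--     for idx in range(n - 1, -1, -1):
--         c = s[idx]
--         suf[idx] = c if idx == n - 1 or c < suf[idx + 1] else suf[idx + 1]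
--     for i in range(n):
--         c = s[i]
--         if suf[i] < c:
--             # some later char is smaller; walk to the first such j,
--             # remembering the first index with a char bigger than c
--             j, k = i + 1, -1
--             while s[j] >= c:
--                 if k == -1 and s[j] > c:
--                     k = j
--                 j += 1
--             return k if k != -1 else i
--     return -1
-- ===== Notes on version B (the rewrite author's own statement) =====
-- stated objective: faster
-- what changed: Replaced A's triply nested index scans with a precomputed suffix-minimum array to find the first descending index in one pass, and a single combined walk that finds the stopping index j while simultaneously tracking the first larger-than-s[i] index k, so the inner rescans disappear.
import Mathlib
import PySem

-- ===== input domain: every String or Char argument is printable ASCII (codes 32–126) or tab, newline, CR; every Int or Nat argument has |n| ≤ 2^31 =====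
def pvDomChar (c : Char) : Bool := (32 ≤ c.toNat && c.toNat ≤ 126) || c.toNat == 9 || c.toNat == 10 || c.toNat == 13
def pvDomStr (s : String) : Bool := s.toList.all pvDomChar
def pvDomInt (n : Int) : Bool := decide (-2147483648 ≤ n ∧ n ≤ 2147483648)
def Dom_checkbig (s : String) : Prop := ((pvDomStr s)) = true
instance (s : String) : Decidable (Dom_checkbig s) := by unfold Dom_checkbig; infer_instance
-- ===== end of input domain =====

-- B replaces A's triple nested scan by a suffix-minimum array and one combined left-to-right scan (alternative algorithm; O(n) instead of O(n^2)/worst O(n^3)).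

-- ===== PORT A =====
-- inner k-loop: for k in range(k0, j): if s[k] > s[i]: return k
def pvAk (cs : List Char) (i k j : Nat) : Option Int :=
  if h : k < j then
    if cs.getD i ' ' < cs.getD k ' ' then some (k : Int)
    else pvAk cs i (k + 1) j
  else none
termination_by j - k

-- middle j-loop: for j in range(j0, len(s)): if s[i] > s[j]: return the k-loop result (or i)
def pvAj (cs : List Char) (i j : Nat) : Option Int :=
  if h : j < cs.length then
    if cs.getD j ' ' < cs.getD i ' ' then some ((pvAk cs i i j).getD (i : Int))
    else pvAj cs i (j + 1)
  else none
termination_by cs.length - j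

-- outer i-loop
def pvAi (cs : List Char) (i : Nat) : Int :=
  if h : i < cs.length then
    match pvAj cs i i with
    | some r => r
    | none => pvAi cs (i + 1)
  else -1
termination_by cs.length - i

def checkbig (s : String) : Int := pvAi s.toList 0

-- ===== PORT B =====
-- suffix minima, built right-to-left (Source B's reverse loop as structural recursion)
def pvSuf (cs : List Char) : List Char :=
  match cs with
  | [] => []
  | c :: rest =>
    match pvSuf rest with
    | [] => [c]
    | m :: t => (if c < m then c else m) :: m :: t

-- Source B's while loop: walk j while s[j] >= c, remembering first k with s[k] > c.
-- (the out-of-range exit is unreachable: pvBw is only entered when a char < c lies ahead)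
def pvBw (cs : List Char) (c : Char) (i j : Nat) (k : Int) : Int :=
  if h : j < cs.length then
    if c ≤ cs.getD j ' ' then
      pvBw cs c i (j + 1) (if k = -1 ∧ c < cs.getD j ' ' then (j : Int) else k)
    else if k ≠ -1 then k else (i : Int)
  else if k ≠ -1 then k else (i : Int)
termination_by cs.length - j

-- Source B's i-scan over the suffix-minimum array
def pvBi (cs suf : List Char) (i : Nat) : Int :=
  if h : i < cs.length then
    if suf.getD i ' ' < cs.getD i ' ' then pvBw cs (cs.getD i ' ') i (i + 1) (-1)
    else pvBi cs suf (i + 1)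
  else -1
termination_by cs.length - i

def checkbig_alt (s : String) : Int := pvBi s.toList (pvSuf s.toList) 0

-- ===== PRECONDITION & SPEC =====
def Spec_checkbig (s : String) (out : Int) : Prop := out = checkbig_alt s
instance (s : String) (out : Int) : Decidable (Spec_checkbig s out) := by unfold Spec_checkbig; infer_instance

-- ===== CLAIM (what is proved, stated in full; the proofs are below) =====
def Claim_equal_checkbig : Prop := ∀ (s : String), Dom_checkbig s → Spec_checkbig s (checkbig s)

-- ===== LEMMAS AND PROOFS =====

theorem pvSuf_length (cs : List Char) : (pvSuf cs).length = cs.length := by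
  induction cs with
  | nil => simp [pvSuf]
  | cons c rest ih =>
    simp only [pvSuf]
    cases h : pvSuf rest with
    | nil =>
      rw [h] at ih
      simp only [List.length_nil] at ih
      simp only [List.length_cons, List.length_nil]
      omega
    | cons m t =>
      rw [h] at ih
      simp only [List.length_cons] at ih ⊢
      omega

-- pvSuf cs at i is a lower bound of cs on [i, len)
theorem pvSuf_le (cs : List Char) : ∀ i m, i ≤ m → m < cs.length →
    (pvSuf cs).getD i ' ' ≤ cs.getD m ' ' := by
  induction cs with
  | nil => intro i m _ h; simp at h
  | cons c rest ih =>
    intro i m him hm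
    simp only [pvSuf]
    cases h : pvSuf rest with
    | nil =>
      have hl : rest.length = 0 := by have := pvSuf_length rest; rw [h] at this; simpa using this.symm
      have hr : rest = [] := List.length_eq_zero_iff.mp hl
      subst hr
      simp only [List.length_cons, List.length_nil] at hm
      have hi0 : i = 0 := by omega
      have hm0 : m = 0 := by omega
      subst hi0; subst hm0
      simp
    | cons mh t =>
      cases i with
      | zero =>
        cases m with
        | zero =>
          simp only [List.getD_cons_zero]
          split
          · exact le_refl _
          · exact not_lt.mp (by assumption)
        | succ m' =>
          have h1 : (pvSuf rest).getD 0 ' ' ≤ rest.getD m' ' ' :=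
            ih 0 m' (Nat.zero_le _) (by simpa using hm)
          rw [h] at h1
          simp only [List.getD_cons_zero, List.getD_cons_succ] at h1 ⊢
          split
          · exact le_trans (le_of_lt (by assumption)) h1
          · exact h1
      | succ i' =>
        cases m with
        | zero => omega
        | succ m' =>
          have h1 : (pvSuf rest).getD i' ' ' ≤ rest.getD m' ' ' :=
            ih i' m' (by omega) (by simpa using hm)
          rw [h] at h1
          simpa using h1

-- pvSuf cs at i is attained on [i, len)
theorem pvSuf_attained (cs : List Char) : ∀ i, i < cs.length →
    ∃ m, i ≤ m ∧ m < cs.length ∧ (pvSuf cs).getD i ' ' = cs.getD m ' ' := by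
  induction cs with
  | nil => intro i h; simp at h
  | cons c rest ih =>
    intro i hi
    simp only [pvSuf]
    cases h : pvSuf rest with
    | nil =>
      have hl : rest.length = 0 := by have := pvSuf_length rest; rw [h] at this; simpa using this.symm
      have hr : rest = [] := List.length_eq_zero_iff.mp hl
      subst hr
      simp only [List.length_cons, List.length_nil] at hi
      have hi0 : i = 0 := by omega
      subst hi0
      exact ⟨0, le_refl _, by simp, by simp⟩
    | cons mh t =>
      have hr : rest ≠ [] := by intro hh; rw [hh] at h; simp [pvSuf] at h
      have hrl : 0 < rest.length := List.length_pos_iff.mpr hr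
      cases i with
      | zero =>
        by_cases hc : c < mh
        · exact ⟨0, le_refl _, hi, by simp [hc]⟩
        · obtain ⟨m, hm0, hml, hme⟩ := ih 0 hrl
          rw [h] at hme
          simp only [List.getD_cons_zero] at hme
          refine ⟨m + 1, by omega, by simpa using hml, ?_⟩
          simp only [List.getD_cons_zero, List.getD_cons_succ, if_neg hc]
          exact hme
      | succ i' =>
        obtain ⟨m, hm0, hml, hme⟩ := ih i' (by simpa using hi)
        rw [h] at hme
        exact ⟨m + 1, by omega, by simpa using hml, by simpa using hme⟩

theorem pvSuf_iff (cs : List Char) (i : Nat) (hi : i < cs.length) :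
    ((pvSuf cs).getD i ' ' < cs.getD i ' ') ↔
    ∃ j, i < j ∧ j < cs.length ∧ cs.getD j ' ' < cs.getD i ' ' := by
  constructor
  · intro hlt
    obtain ⟨m, hm0, hml, hme⟩ := pvSuf_attained cs i hi
    rw [hme] at hlt
    have : i ≠ m := by intro hh; subst hh; exact lt_irrefl _ hlt
    exact ⟨m, by omega, hml, hlt⟩
  · intro ⟨j, hij, hjl, hlt⟩
    exact lt_of_le_of_lt (pvSuf_le cs i j (by omega) hjl) hlt

-- A's j-loop returns none when no later smaller char exists
theorem pvAj_none (cs : List Char) (i : Nat) :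
    ∀ j, (∀ m, j ≤ m → m < cs.length → ¬ cs.getD m ' ' < cs.getD i ' ') →
    pvAj cs i j = none := by
  intro j
  induction hd : cs.length - j generalizing j with
  | zero =>
    intro _
    rw [pvAj]
    simp only [dif_neg (show ¬ j < cs.length by omega)]
  | succ d ihd =>
    intro hno
    rw [pvAj]
    have hj : j < cs.length := by omega
    rw [dif_pos hj, if_neg (hno j (le_refl _) hj)]
    exact ihd (j + 1) (by omega) (fun m h1 h2 => hno m (by omega) h2)

-- A's j-loop at the first qualifying index j₀
theorem pvAj_some (cs : List Char) (i j₀ : Nat) (hj₀ : j₀ < cs.length)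
    (hlt : cs.getD j₀ ' ' < cs.getD i ' ') :
    ∀ j, j ≤ j₀ → (∀ m, j ≤ m → m < j₀ → ¬ cs.getD m ' ' < cs.getD i ' ') →
    pvAj cs i j = some ((pvAk cs i i j₀).getD (i : Int)) := by
  intro j
  induction hd : j₀ - j generalizing j with
  | zero =>
    intro hle _
    have hjj : j = j₀ := by omega
    subst hjj
    rw [pvAj, dif_pos hj₀, if_pos hlt]
  | succ d ihd =>
    intro hle hmin
    rw [pvAj]
    have hjlen : j < cs.length := by omega
    rw [dif_pos hjlen, if_neg (hmin j (le_refl _) (by omega))]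
    exact ihd (j + 1) (by omega) (by omega) (fun m h1 h2 => hmin m (by omega) h2)

-- B's while loop with a set k never changes it
theorem pvBw_keep (cs : List Char) (c : Char) (i : Nat) (j₀ : Nat) (hj₀ : j₀ < cs.length)
    (hstop : cs.getD j₀ ' ' < c) :
    ∀ j, j ≤ j₀ → (∀ m, j ≤ m → m < j₀ → c ≤ cs.getD m ' ') →
    ∀ kv : Int, kv ≠ -1 → pvBw cs c i j kv = kv := by
  intro j
  induction hd : j₀ - j generalizing j with
  | zero =>
    intro hle _ kv hkv
    have hjj : j = j₀ := by omega
    subst hjj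
    rw [pvBw, dif_pos hj₀, if_neg (not_le.mpr hstop), if_pos hkv]
  | succ d ihd =>
    intro hle hge kv hkv
    rw [pvBw]
    have hjlen : j < cs.length := by omega
    rw [dif_pos hjlen, if_pos (hge j (le_refl _) (by omega)), if_neg (by simp [hkv])]
    exact ihd (j + 1) (by omega) (by omega) (fun m h1 h2 => hge m (by omega) h2) kv hkv

-- B's while loop from an unset k computes A's k-loop result
theorem pvBw_eq_pvAk (cs : List Char) (i : Nat) (j₀ : Nat) (hj₀ : j₀ < cs.length)
    (hstop : cs.getD j₀ ' ' < cs.getD i ' ') :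
    ∀ j, j ≤ j₀ → (∀ m, j ≤ m → m < j₀ → cs.getD i ' ' ≤ cs.getD m ' ') →
    pvBw cs (cs.getD i ' ') i j (-1) = (pvAk cs i j j₀).getD (i : Int) := by
  intro j
  induction hd : j₀ - j generalizing j with
  | zero =>
    intro hle _
    have hjj : j = j₀ := by omega
    subst hjj
    rw [pvBw, pvAk, dif_pos hj₀, if_neg (not_le.mpr hstop), dif_neg (lt_irrefl _)]
    simp
  | succ d ihd =>
    intro hle hge
    rw [pvBw, pvAk]
    have hjlen : j < cs.length := by omega
    have hjlt : j < j₀ := by omega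
    rw [dif_pos hjlen, if_pos (hge j (le_refl _) hjlt), dif_pos hjlt]
    by_cases hgt : cs.getD i ' ' < cs.getD j ' '
    · rw [if_pos ⟨rfl, hgt⟩, if_pos hgt]
      rw [pvBw_keep cs (cs.getD i ' ') i j₀ hj₀ hstop (j + 1) (by omega)
            (fun m h1 h2 => hge m (by omega) h2) (j : Int) (by omega)]
      simp
    · rw [if_neg (fun hh => hgt hh.2), if_neg hgt]
      exact ihd (j + 1) (by omega) (by omega) (fun m h1 h2 => hge m (by omega) h2)

-- A's k-loop may start one step later: s[i] > s[i] is false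
theorem pvAk_shift (cs : List Char) (i j₀ : Nat) (hij : i < j₀) :
    pvAk cs i i j₀ = pvAk cs i (i + 1) j₀ := by
  rw [pvAk]
  rw [dif_pos hij, if_neg (lt_irrefl _)]

-- main loop equivalence
theorem pvAi_eq_pvBi (cs : List Char) : ∀ i, pvAi cs i = pvBi cs (pvSuf cs) i := by
  intro i
  induction hd : cs.length - i generalizing i with
  | zero =>
    rw [pvAi, pvBi]
    simp only [dif_neg (show ¬ i < cs.length by omega)]
  | succ d ihd =>
    rw [pvAi, pvBi]
    have hi : i < cs.length := by omega
    simp only [dif_pos hi]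
    by_cases hE : ∃ j, i < j ∧ j < cs.length ∧ cs.getD j ' ' < cs.getD i ' '
    · rw [if_pos ((pvSuf_iff cs i hi).mpr hE)]
      obtain ⟨hij₀, hj₀l, hj₀lt⟩ : i < Nat.find hE ∧ Nat.find hE < cs.length ∧
          cs.getD (Nat.find hE) ' ' < cs.getD i ' ' := Nat.find_spec hE
      have hnolt : ∀ m, i ≤ m → m < Nat.find hE → ¬ cs.getD m ' ' < cs.getD i ' ' := by
        intro m h1 h2 hc
        rcases Nat.eq_or_lt_of_le h1 with h | h
        · subst h; exact lt_irrefl _ hc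
        · exact Nat.find_min hE h2 ⟨h, by omega, hc⟩
      rw [pvAj_some cs i (Nat.find hE) hj₀l hj₀lt i (by omega) hnolt]
      rw [pvBw_eq_pvAk cs i (Nat.find hE) hj₀l hj₀lt (i + 1) (by omega)
            (fun m h1 h2 => not_lt.mp (hnolt m (by omega) h2))]
      rw [pvAk_shift cs i (Nat.find hE) hij₀]
    · rw [if_neg (fun hc => hE ((pvSuf_iff cs i hi).mp hc))]
      have hnone : pvAj cs i i = none := by
        apply pvAj_none
        intro m h1 h2 hc
        rcases Nat.eq_or_lt_of_le h1 with h | h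
        · subst h; exact lt_irrefl _ hc
        · exact hE ⟨m, h, h2, hc⟩
      rw [hnone]
      exact ihd (i + 1) (by omega)

-- ===== VERDICT (by name: the statement is the Claim_ definition above) =====
theorem checkbig_spec : Claim_equal_checkbig := by
  intro s _
  unfold Spec_checkbig checkbig checkbig_alt
  exact pvAi_eq_pvBi s.toList 0
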